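-- pv_equiv track=rewrite | github.com/prdlk/gh-commit | smartcommit.py | get_files_in_scope
-- ===== SOURCE A (Python) =====
-- def get_files_in_scope(files: list[str], paths: list[str]) -> list[str]:
--     matched = []
--     for f in files:
--         for path in paths:
--             if f.startswith(path):
--                 matched.append(f)
--                 break
--     return matched
-- ===== SOURCE B (Python) =====
-- def get_files_in_scope(files: list[str], paths: list[str]) -> list[str]:
--     # One hash set of all paths + the distinct prefix lengths: per file we do
--     # one set lookup per distinct path length instead of scanning every path.
--     path_set = set(paths)
--     lengths = sorted({len(p) for p in paths})
--     return [f for f in files if any(f[:L] in path_set for L in lengths)]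
-- ===== Notes on version B (the rewrite author's own statement) =====
-- stated objective: faster
-- what changed: Replaces the per-file scan over all paths with a precomputed hash set of paths plus the sorted distinct path lengths: each file is tested by slicing it at each distinct length and doing one set lookup, so the inner scan over paths disappears.
import Mathlib
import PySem

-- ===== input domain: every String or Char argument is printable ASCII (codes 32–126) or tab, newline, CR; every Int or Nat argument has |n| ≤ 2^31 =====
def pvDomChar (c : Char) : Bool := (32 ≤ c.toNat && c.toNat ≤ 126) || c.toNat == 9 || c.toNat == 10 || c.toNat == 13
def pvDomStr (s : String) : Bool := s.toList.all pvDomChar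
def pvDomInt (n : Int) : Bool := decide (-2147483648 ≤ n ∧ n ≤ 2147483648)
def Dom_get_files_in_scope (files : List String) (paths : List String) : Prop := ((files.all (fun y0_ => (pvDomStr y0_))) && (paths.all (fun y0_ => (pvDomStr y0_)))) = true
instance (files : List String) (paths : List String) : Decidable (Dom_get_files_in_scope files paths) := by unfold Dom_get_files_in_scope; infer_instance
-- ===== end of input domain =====

-- B replaces the per-file scan of all paths by one set of paths plus the sorted distinct
-- path lengths, checking each file with one set lookup per distinct length (objective: faster).


-- ===== PORT A =====
-- inner 'for path in paths: if f.startswith(path): …; break' — returns whether it broke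
def pvAnyPrefixBreak (f : String) : List String → Bool
  | [] => false
  | p :: rest => if PySem.Str.startswith f p then true else pvAnyPrefixBreak f rest

def get_files_in_scope (files : List String) (paths : List String) : List String :=
  files.foldl (fun matched f => if pvAnyPrefixBreak f paths then matched ++ [f] else matched) []

-- ===== PORT B =====
def get_files_in_scope_alt (files : List String) (paths : List String) : List String :=
  let pathSet : PySem.Set String := PySem.Set.ofList paths
  let lengths : List Int :=
    PySem.List.sorted (PySem.Set.ofList (paths.map (fun p => PySem.Str.len p))) (fun x => x) false
  files.filter (fun f => lengths.any (fun L => PySem.Set.contains pathSet (PySem.Str.slice f none (some L))))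

-- ===== PRECONDITION & SPEC =====
def Spec_get_files_in_scope (files : List String) (paths : List String) (out : List String) : Prop := out = get_files_in_scope_alt files paths
instance (files : List String) (paths : List String) (out : List String) : Decidable (Spec_get_files_in_scope files paths out) := by unfold Spec_get_files_in_scope; infer_instance

-- ===== CLAIM (what is proved, stated in full; the proofs are below) =====
def Claim_equal_get_files_in_scope : Prop := ∀ (files : List String) (paths : List String), Dom_get_files_in_scope files paths → Spec_get_files_in_scope files paths (get_files_in_scope files paths)

-- ===== LEMMAS AND PROOFS =====

-- A's inner loop is List.any of startswith
theorem pvAnyPrefixBreak_eq_any (f : String) (paths : List String) :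
    pvAnyPrefixBreak f paths = paths.any (fun p => PySem.Str.startswith f p) := by
  induction paths with
  | nil => rfl
  | cons p rest ih =>
    by_cases h : PySem.Str.startswith f p <;> simp [pvAnyPrefixBreak, ih]

-- the per-file tests agree
theorem pv_test_eq (f : String) (paths : List String) :
    pvAnyPrefixBreak f paths =
      (PySem.List.sorted (PySem.Set.ofList (paths.map (fun p => PySem.Str.len p))) (fun x => x) false).any
        (fun L => PySem.Set.contains (PySem.Set.ofList paths) (PySem.Str.slice f none (some L))) := by
  rw [pvAnyPrefixBreak_eq_any, Bool.eq_iff_iff]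
  simp only [List.any_eq_true, PySem.List.mem_sorted, PySem.Set.mem_ofList, List.mem_map,
    PySem.Str.startswith_eq, PySem.Chars.startswith_iff, PySem.Set.contains,
    List.contains_iff_mem, PySem.Set.mem_ofList]
  constructor
  · rintro ⟨p, hp, hpre⟩
    refine ⟨PySem.Str.len p, ⟨p, hp, rfl⟩, ?_⟩
    have hslice : (PySem.Str.slice f none (some (PySem.Str.len p))).toList = p.toList := by
      rw [PySem.Str.toList_slice]
      show PySem.List.slice f.toList none (some (PySem.Str.len p)) = p.toList
      rw [PySem.List.slice_to _ (by rw [PySem.Str.len_eq]; positivity), PySem.Str.len_eq,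
          Int.toNat_natCast]
      exact (List.prefix_iff_eq_take.mp hpre).symm
    rw [String.toList_inj.mp hslice]; exact hp
  · rintro ⟨L, ⟨p, hp, hL⟩, hmem⟩
    refine ⟨_, hmem, ?_⟩
    have h0 : (0:Int) ≤ L := by rw [← hL, PySem.Str.len_eq]; positivity
    have : (PySem.Str.slice f none (some L)).toList = f.toList.take L.toNat := by
      rw [PySem.Str.toList_slice]
      show PySem.List.slice f.toList none (some L) = f.toList.take L.toNat
      exact PySem.List.slice_to _ h0
    rw [this]; exact List.take_prefix _ _

theorem get_files_in_scope_eq (files paths : List String) :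
    get_files_in_scope files paths = get_files_in_scope_alt files paths := by
  unfold get_files_in_scope get_files_in_scope_alt
  have := PySem.List.foldl_append_if (fun f => pvAnyPrefixBreak f paths) (fun f => f) files []
  simp only [List.nil_append, List.map_id'] at this
  rw [this]
  exact List.filter_congr (fun f _ => pv_test_eq f paths)

-- ===== VERDICT (by name: the statement is the Claim_ definition above) =====
theorem get_files_in_scope_spec : Claim_equal_get_files_in_scope := by
  intro files paths _
  exact get_files_in_scope_eq files paths
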